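-- pv_equiv track=rewrite | github.com/drsparklegasm/mgs1-scripts | creditsHacking/lzss-test.py | lzss_compress
-- ===== SOURCE A (Python) =====
-- def lzss_compress(data, window_size=256, lookahead_buffer_size=15):
--     """
--     Compress a bytes object using a simple LZSS algorithm.
--
--     Args:
--         data (bytes): The data to compress.
--         window_size (int): The size of the sliding window.
--         lookahead_buffer_size (int): The size of the lookahead buffer.
--
--     Returns:
--         list[tuple]: The compressed data as a list of (offset, length, next_byte) tuples.
--     """
--     compressed = []
--     i = 0
--
--     while i < len(data):
--         match_distance = 0
--         match_length = 0
--
--         # Sliding window start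
--         start_window = max(0, i - window_size)
--
--         # Look for the longest match in the sliding window
--         for j in range(start_window, i):
--             length = 0
--             while (length < lookahead_buffer_size and
--                    i + length < len(data) and
--                    data[j + length] == data[i + length]):
--                 length += 1
--
--             if length > match_length:
--                 match_distance = i - j
--                 match_length = length
--
--         # If a match is found, add it as a (distance, length, next byte) tuple
--         if match_length > 1:
--             next_byte = data[i + match_length] if i + match_length < len(data) else None
--             compressed.append((match_distance, match_length, next_byte))
--             i += match_length + 1
--         else:
--             # Add a literal (distance=0, length=0, next_byte)
--             compressed.append((0, 0, data[i]))
--             i += 1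
--
--     return compressed
-- ===== SOURCE B (Python) =====
-- def _prefix_len(data, j, i, limit):
--     """Common-prefix length of data[j:] and data[i:], capped at limit
--     (overlap allowed: j + k may reach into the lookahead region)."""
--     for k in range(limit):
--         if data[j + k] != data[i + k]:
--             return k
--     return limit
--
--
-- def _scan(data, window_size, lookahead_buffer_size, occ, i):
--     """Prune position i's bucket to the window, score each candidate as a
--     (length, distance) tuple, return the lexicographic max (default (0, 0))."""
--     n = len(data)
--     lo = max(0, i - window_size)
--     limit = min(lookahead_buffer_size, n - i)
--     best = (0, 0)
--     if limit > 1: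
--         lst = occ.get(data[i])
--         if lst is not None:
--             k = 0
--             while k < len(lst) and lst[k] < lo:
--                 k += 1
--             del lst[:k]
--             scored = [(_prefix_len(data, j, i, limit), i - j) for j in lst]
--             for s in scored:
--                 if best < s:
--                     best = s
--     return best
--
--
-- def lzss_compress(data, window_size=256, lookahead_buffer_size=15):
--     """LZSS via a hash index (byte -> ascending window positions, pruned
--     lazily): only candidates sharing the first byte are scored, and the
--     winner is the lexicographic max of (length, distance) tuples, which
--     reproduces A's first-argmax tie-break (smallest j = largest distance)."""
--     n = len(data)
--     out = []
--     occ = {}          # byte -> ascending positions recorded so far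
--     done = 0          # positions [0, done) are recorded in occ
--     i = 0
--     while i < n:
--         while done < i:
--             occ.setdefault(data[done], []).append(done)
--             done += 1
--         best = _scan(data, window_size, lookahead_buffer_size, occ, i)
--         if best[0] > 1:
--             nxt = data[i + best[0]] if i + best[0] < n else None
--             out.append((best[1], best[0], nxt))
--             i += best[0] + 1
--         else:
--             out.append((0, 0, data[i]))
--             i += 1
--     return out
-- ===== Notes on version B (the rewrite author's own statement) =====
-- stated objective: faster
-- what changed: B replaces A's scan of every window position (inner while per position) with a hash index byte -> ascending window positions pruned lazily, scoring only same-first-byte candidates with a capped common-prefix helper and selecting the winner as the lexicographic max of (length, distance) tuples, which reproduces A's first-argmax tie-break.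
import Mathlib
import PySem

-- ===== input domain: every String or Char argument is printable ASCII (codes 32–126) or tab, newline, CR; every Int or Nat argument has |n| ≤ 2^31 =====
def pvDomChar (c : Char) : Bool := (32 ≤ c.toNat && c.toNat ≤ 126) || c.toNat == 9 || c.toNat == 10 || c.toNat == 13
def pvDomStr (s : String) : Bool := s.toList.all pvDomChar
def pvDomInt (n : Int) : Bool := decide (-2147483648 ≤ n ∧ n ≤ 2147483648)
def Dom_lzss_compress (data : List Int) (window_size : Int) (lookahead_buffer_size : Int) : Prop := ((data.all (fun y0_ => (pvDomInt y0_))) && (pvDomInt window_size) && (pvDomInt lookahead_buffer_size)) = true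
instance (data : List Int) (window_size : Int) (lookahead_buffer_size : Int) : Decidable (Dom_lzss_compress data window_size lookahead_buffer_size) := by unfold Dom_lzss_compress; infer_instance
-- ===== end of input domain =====

-- B replaces A's scan of every window position with a hash index (byte -> ascending window
-- positions, pruned lazily), scoring only same-first-byte candidates by (length, distance)
-- tuples and taking their lexicographic max; same output.

-- ===== PORT A =====
-- A's inner `while length < ... : length += 1`; fuel `data.length - i` suffices
-- (the loop stops at the latest when i + length reaches data.length)
def pvExtend (data : List Int) (la : Int) (j i len fuel : Nat) : Nat :=
  match fuel with
  | 0 => len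
  | Nat.succ f =>
    if (len : Int) < la ∧ i + len < data.length ∧ data.getD (j + len) 0 = data.getD (i + len) 0 then
      pvExtend data la j i (len + 1) f
    else len

-- body of A's `for j in range(start_window, i)` loop (state = (match_distance, match_length))
def pvAStep (data : List Int) (la : Int) (i : Nat) (acc : Int × Nat) (j : Nat) : Int × Nat :=
  let len := pvExtend data la j i 0 (data.length - i)
  if acc.2 < len then ((i : Int) - (j : Int), len) else acc

def lzssALoop (data : List Int) (ws la : Int) (i : Nat) : List (Int × Int × Option Int) :=
  if h : i < data.length then
    let start : Nat := ((i : Int) - ws).toNat   -- max(0, i - window_size)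
    let best : Int × Nat := (List.range' start (i - start)).foldl (pvAStep data la i) (0, 0)
    if 1 < best.2 then
      (best.1, (best.2 : Int),
        if i + best.2 < data.length then some (data.getD (i + best.2) 0) else none)
        :: lzssALoop data ws la (i + best.2 + 1)
    else
      (0, 0, some (data.getD i 0)) :: lzssALoop data ws la (i + 1)
  else []
termination_by data.length - i
decreasing_by all_goals omega

def lzss_compress (data : List Int) (window_size : Int) (lookahead_buffer_size : Int) :
    List (Int × Int × Option Int) :=
  lzssALoop data window_size lookahead_buffer_size 0

-- ===== PORT B =====
-- `for k in range(limit): if data[j+k] != data[i+k]: return k / return limit`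
def pvPLoop (data : List Int) (j i : Nat) (limit : Int) : List Nat → Int
  | [] => limit
  | k :: ks =>
    if data.getD (j + k) 0 == data.getD (i + k) 0 then pvPLoop data j i limit ks
    else (k : Int)

def pvPrefixLen (data : List Int) (j i : Nat) (limit : Int) : Int :=
  pvPLoop data j i limit (List.range limit.toNat)

-- `if best < s: best = s` with Python's lexicographic tuple comparison
def pvLexMax (a b : Int × Int) : Int × Int :=
  if a.1 < b.1 ∨ (a.1 = b.1 ∧ a.2 < b.2) then b else a

-- `occ.setdefault(data[done], []).append(done)` for each newly consumed position
def pvRecord (data : List Int) (occ : PySem.Dict Int (List Nat)) (l : List Nat) :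
    PySem.Dict Int (List Nat) :=
  l.foldl (fun d p => d.modify (data.getD p 0) [] (fun lst => lst ++ [p])) occ

-- the per-position probe: prune the bucket, score the candidates, lexicographic max
def pvBScan (data : List Int) (ws la : Int) (occ1 : PySem.Dict Int (List Nat)) (i : Nat) :
    (Int × Int) × PySem.Dict Int (List Nat) :=
  let lo : Nat := ((i : Int) - ws).toNat   -- max(0, i - window_size)
  let limit : Int := min la ((data.length : Int) - (i : Int))
  if 1 < limit then
    match occ1.get? (data.getD i 0) with
    | none => ((0, 0), occ1)
    | some lst =>
      -- `while k < len(lst) and lst[k] < lo: k += 1; del lst[:k]`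
      let lst2 := lst.drop (lst.takeWhile (fun p => decide (p < lo))).length
      ((lst2.map (fun j => (pvPrefixLen data j i limit, (i : Int) - (j : Int)))).foldl
          pvLexMax (0, 0),
        occ1.insert (data.getD i 0) lst2)
  else ((0, 0), occ1)

def lzssBLoop (data : List Int) (ws la : Int) (occ : PySem.Dict Int (List Nat)) (done i : Nat) :
    List (Int × Int × Option Int) :=
  if h : i < data.length then
    let occ1 := pvRecord data occ (List.range' done (i - done))
    let st := pvBScan data ws la occ1 i
    if 1 < st.1.1 then
      (st.1.2, st.1.1,
        if (i : Int) + st.1.1 < (data.length : Int) then some (data.getD (i + st.1.1.toNat) 0)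
        else none)
        :: lzssBLoop data ws la st.2 i (i + st.1.1.toNat + 1)
    else
      (0, 0, some (data.getD i 0)) :: lzssBLoop data ws la st.2 i (i + 1)
  else []
termination_by data.length - i
decreasing_by all_goals omega

def lzss_compress_alt (data : List Int) (window_size : Int) (lookahead_buffer_size : Int) :
    List (Int × Int × Option Int) :=
  lzssBLoop data window_size lookahead_buffer_size PySem.Dict.empty 0 0

-- ===== PRECONDITION & SPEC =====
def Spec_lzss_compress (data : List Int) (window_size : Int) (lookahead_buffer_size : Int) (out : List (Int × Int × Option Int)) : Prop := out = lzss_compress_alt data window_size lookahead_buffer_size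
instance (data : List Int) (window_size : Int) (lookahead_buffer_size : Int) (out : List (Int × Int × Option Int)) : Decidable (Spec_lzss_compress data window_size lookahead_buffer_size out) := by unfold Spec_lzss_compress; infer_instance

-- ===== CLAIM (what is proved, stated in full; the proofs are below) =====
def Claim_equal_lzss_compress : Prop := ∀ (data : List Int) (window_size : Int) (lookahead_buffer_size : Int), Dom_lzss_compress data window_size lookahead_buffer_size → Spec_lzss_compress data window_size lookahead_buffer_size (lzss_compress data window_size lookahead_buffer_size)

-- ===== LEMMAS AND PROOFS =====

-- B's occ dictionary invariant: every bucket is the ascending list of the positions < d holding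
-- that byte, from some cut-off m that never exceeds the (monotone) window bound nor d itself.
def pvInv (data : List Int) (ws : Int) (occ : PySem.Dict Int (List Nat)) (d : Nat) : Prop :=
  ∀ b : Int, ∃ m : Nat, m ≤ ((d : Int) - ws).toNat ∧ m ≤ d ∧
    occ.getD b [] = (List.range d).filter (fun p => data.getD p 0 == b && decide (m ≤ p))

theorem pvInv_empty (data : List Int) (ws : Int) : pvInv data ws PySem.Dict.empty 0 := by
  intro b
  exact ⟨0, by simp, by simp, by simp [PySem.Dict.getD_empty]⟩

theorem pvExtend_fuel (data : List Int) (la : Int) (j i : Nat) :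
    ∀ (f f' len : Nat), data.length ≤ i + len + f → data.length ≤ i + len + f' →
      pvExtend data la j i len f = pvExtend data la j i len f' := by
  intro f
  induction f with
  | zero =>
    intro f' len hf hf'
    cases f' with
    | zero => rfl
    | succ g =>
      simp only [pvExtend]
      rw [if_neg]
      rintro ⟨-, h2, -⟩; omega
  | succ f ih =>
    intro f' len hf hf'
    cases f' with
    | zero =>
      simp only [pvExtend]
      rw [if_neg]
      rintro ⟨-, h2, -⟩; omega
    | succ g =>
      simp only [pvExtend]
      by_cases hc : (len : Int) < la ∧ i + len < data.length ∧
          data.getD (j + len) 0 = data.getD (i + len) 0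
      · rw [if_pos hc, if_pos hc]
        exact ih g (len + 1) (by omega) (by omega)
      · rw [if_neg hc, if_neg hc]

theorem pvExtend_zero_of_ne (data : List Int) (la : Int) (j i : Nat)
    (hne : data.getD j 0 ≠ data.getD i 0) (f : Nat) : pvExtend data la j i 0 f = 0 := by
  cases f with
  | zero => rfl
  | succ g =>
    simp only [pvExtend]
    rw [if_neg]
    rintro ⟨-, -, h3⟩
    exact hne h3

-- result of A's inner while: either still the start value, or bounded by la and by the data end
theorem pvExtend_cases (data : List Int) (la : Int) (j i : Nat) :
    ∀ (f len : Nat), pvExtend data la j i len f = len ∨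
      ((pvExtend data la j i len f : Int) ≤ la ∧ i + pvExtend data la j i len f ≤ data.length) := by
  intro f
  induction f with
  | zero => intro len; left; rfl
  | succ f ih =>
    intro len
    simp only [pvExtend]
    by_cases hc : (len : Int) < la ∧ i + len < data.length ∧
        data.getD (j + len) 0 = data.getD (i + len) 0
    · rw [if_pos hc]
      rcases ih (len + 1) with h | h
      · right; rw [h]; push_cast; constructor
        · omega
        · omega
      · right; exact h
    · rw [if_neg hc]; left; rfl

-- A's match length equals B's capped common-prefix length (guard case 0 ≤ limit)
theorem pvLen_eq (data : List Int) (la limit : Int) (j i : Nat)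
    (hlim : limit = min la ((data.length : Int) - (i : Int))) (hi : i < data.length)
    (h0 : 0 ≤ limit) :
    ∀ (d k : Nat), limit.toNat - k = d → k ≤ limit.toNat →
      pvPLoop data j i limit (List.range' k (limit.toNat - k))
        = (pvExtend data la j i k (data.length - i) : Int) := by
  intro d
  induction d with
  | zero =>
    intro k hd hk
    have hkeq : k = limit.toNat := by omega
    rw [hd]
    have hnc : ¬ ((k : Int) < la ∧ i + k < data.length ∧
        data.getD (j + k) 0 = data.getD (i + k) 0) := by
      rintro ⟨h1, h2, -⟩
      omega
    have hres : pvExtend data la j i k (data.length - i) = k := by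
      cases hfe : data.length - i with
      | zero => simp [pvExtend]
      | succ f => simp only [pvExtend]; rw [if_neg hnc]
    rw [List.range'_zero]
    simp only [pvPLoop]
    rw [hres]
    omega
  | succ d ih =>
    intro k hd hk
    have hklt : k < limit.toNat := by omega
    have hrange : List.range' k (limit.toNat - k) = k :: List.range' (k + 1) (limit.toNat - (k + 1)) := by
      have : limit.toNat - k = (limit.toNat - (k + 1)) + 1 := by omega
      rw [this, List.range'_succ]
    rw [hrange]
    have hfuel : ∃ f, data.length - i = f + 1 := ⟨data.length - i - 1, by omega⟩
    obtain ⟨f, hf⟩ := hfuel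
    have hk_la : (k : Int) < la := by omega
    have hk_n : i + k < data.length := by
      have : (k : Int) < (data.length : Int) - (i : Int) := by omega
      omega
    by_cases heq : data.getD (j + k) 0 = data.getD (i + k) 0
    · simp only [pvPLoop]
      rw [if_pos (by simpa using heq)]
      have hstep : pvExtend data la j i k (data.length - i)
          = pvExtend data la j i (k + 1) (data.length - i) := by
        rw [hf]
        simp only [pvExtend]
        rw [if_pos ⟨hk_la, hk_n, heq⟩]
        exact pvExtend_fuel data la j i f (f + 1) (k + 1) (by omega) (by omega)
      rw [hstep]
      exact ih (k + 1) (by omega) (by omega)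
    · simp only [pvPLoop]
      rw [if_neg (by simpa using heq), hf]
      simp only [pvExtend]
      rw [if_neg (by rintro ⟨-, -, h3⟩; exact heq h3)]

-- A's fold over all window positions ignores candidates with a different first byte
theorem pvFoldA_filter (data : List Int) (la : Int) (i : Nat) :
    ∀ (l : List Nat) (acc : Int × Nat),
      l.foldl (pvAStep data la i) acc =
        (l.filter (fun j => data.getD j 0 == data.getD i 0)).foldl (pvAStep data la i) acc := by
  intro l
  induction l with
  | nil => intro acc; rfl
  | cons j t ih =>
    intro acc
    by_cases hb : data.getD j 0 = data.getD i 0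
    · rw [List.foldl_cons, List.filter_cons_of_pos (by simpa using hb), List.foldl_cons, ih]
    · rw [List.foldl_cons, List.filter_cons_of_neg (by simpa using hb)]
      have hstep : pvAStep data la i acc j = acc := by
        simp [pvAStep, pvExtend_zero_of_ne data la j i hb]
      rw [hstep, ih]

-- when the capped limit is at most 1, A's fold never finds a usable match
theorem pvFoldA_le_one (data : List Int) (la limit : Int) (i : Nat)
    (hlim : limit = min la ((data.length : Int) - (i : Int))) (hle : limit ≤ 1) :
    ∀ (l : List Nat) (acc : Int × Nat), acc.2 ≤ 1 →
      (l.foldl (pvAStep data la i) acc).2 ≤ 1 := by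
  intro l
  induction l with
  | nil => intro acc h; exact h
  | cons j t ih =>
    intro acc h
    rw [List.foldl_cons]
    apply ih
    simp only [pvAStep]
    split
    · rcases pvExtend_cases data la j i (data.length - i) 0 with h | h <;> omega
    · exact h

-- the coupling: A's (distance, length) state vs B's lexicographic (length, distance) state
theorem pvCouple (data : List Int) (la limit : Int) (i : Nat)
    (hlim : limit = min la ((data.length : Int) - (i : Int))) (hi : i < data.length)
    (h1 : 1 < limit) :
    ∀ (l : List Nat) (accA : Int × Nat) (accB : Int × Int),
      l.Pairwise (· < ·) →
      ((2 ≤ accA.2 ∧ accB = ((accA.2 : Int), accA.1) ∧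
          ∀ j ∈ l, (i : Int) - (j : Int) < accB.2) ∨
        (accA.2 ≤ 1 ∧ accB.1 ≤ 1)) →
      (2 ≤ (l.foldl (pvAStep data la i) accA).2 ∧
        (l.map (fun j => (pvPrefixLen data j i limit, (i : Int) - (j : Int)))).foldl pvLexMax accB
          = (((l.foldl (pvAStep data la i) accA).2 : Int),
             (l.foldl (pvAStep data la i) accA).1)) ∨
      ((l.foldl (pvAStep data la i) accA).2 ≤ 1 ∧
        ((l.map (fun j => (pvPrefixLen data j i limit, (i : Int) - (j : Int)))).foldl
            pvLexMax accB).1 ≤ 1) := by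
  intro l
  induction l with
  | nil =>
    intro accA accB _ hinv
    simp only [List.foldl_nil, List.map_nil]
    rcases hinv with ⟨h2, heq, -⟩ | ⟨hA, hB⟩
    · exact Or.inl ⟨h2, heq⟩
    · exact Or.inr ⟨hA, hB⟩
  | cons j t ih =>
    intro accA accB hpw hinv
    rw [List.pairwise_cons] at hpw
    have hlen : pvPrefixLen data j i limit
        = ((pvExtend data la j i 0 (data.length - i) : Nat) : Int) := by
      rw [pvPrefixLen, List.range_eq_range']
      have := pvLen_eq data la limit j i hlim hi (by omega) limit.toNat 0 (by omega) (by omega)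
      simpa using this
    obtain ⟨dA, lA⟩ := accA
    obtain ⟨LB, DB⟩ := accB
    simp only [List.foldl_cons, List.map_cons]
    apply ih _ _ hpw.2
    rw [hlen]
    set e := pvExtend data la j i 0 (data.length - i) with he
    simp only [pvAStep, pvLexMax, Prod.mk.injEq] at *
    rcases hinv with ⟨h2, ⟨heq1, heq2⟩, hrest⟩ | ⟨hA2, hB1⟩
    · by_cases hup : lA < e
      · rw [if_pos hup, if_pos (Or.inl (by omega))]
        refine Or.inl ⟨by omega, rfl, ?_⟩
        intro j' hj'
        have := hpw.1 j' hj'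
        simp only []
        omega
      · rw [if_neg hup, if_neg ?_]
        · exact Or.inl ⟨h2, by simp [heq1, heq2], fun j' hj' => hrest j' (List.mem_cons_of_mem j hj')⟩
        · rintro (hc | ⟨hc1, hc2⟩)
          · omega
          · have := hrest j (List.mem_cons_self ..)
            simp only [] at this hc2
            omega
    · by_cases hup : lA < e
      · rw [if_pos hup]
        by_cases h2e : 2 ≤ e
        · rw [if_pos (Or.inl (by omega))]
          refine Or.inl ⟨by omega, rfl, ?_⟩
          intro j' hj'
          have := hpw.1 j' hj'
          simp only []
          omega
        · refine Or.inr ⟨by omega, ?_⟩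
          split_ifs
          · simp only []; omega
          · simp only []; omega
      · rw [if_neg hup]
        refine Or.inr ⟨hA2, ?_⟩
        split_ifs
        · simp only []; omega
        · simp only []; omega

-- (range i).filter (lo ≤ ·) is the tail window range' lo (i - lo)
theorem pvRange_filter_ge (lo : Nat) : ∀ i : Nat,
    (List.range i).filter (fun p => decide (lo ≤ p)) = List.range' lo (i - lo) := by
  intro i
  induction i with
  | zero => simp
  | succ n ih =>
    rw [List.range_succ, List.filter_append, ih]
    by_cases h : lo ≤ n
    · have : n + 1 - lo = (n - lo) + 1 := by omega
      rw [this, List.range'_concat]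
      simp [h, Nat.add_sub_cancel' h]
    · have h1 : n + 1 - lo = 0 := by omega
      have h2 : n - lo = 0 := by omega
      simp [h, h1, h2]

-- on an ascending list, dropping the leading out-of-window prefix keeps exactly the in-window part
theorem pvDropWhile_sorted (lo : Nat) : ∀ l : List Nat, l.Pairwise (· < ·) →
    l.dropWhile (fun p => decide (p < lo)) = l.filter (fun p => decide (lo ≤ p)) := by
  intro l
  induction l with
  | nil => intro _; rfl
  | cons a t ih =>
    intro hp
    rw [List.pairwise_cons] at hp
    by_cases h : a < lo
    · rw [List.dropWhile_cons_of_pos (by simpa using h),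
        List.filter_cons_of_neg (by simp; omega), ih hp.2]
    · rw [List.dropWhile_cons_of_neg (by simpa using h),
        List.filter_cons_of_pos (by simp; omega)]
      rw [List.filter_eq_self.2]
      intro x hx
      have := hp.1 x hx
      simp; omega

theorem pvDrop_takeWhile (p : Nat → Bool) : ∀ l : List Nat,
    l.drop (l.takeWhile p).length = l.dropWhile p := by
  intro l
  induction l with
  | nil => rfl
  | cons a t ih =>
    by_cases h : p a
    · rw [List.takeWhile_cons_of_pos h, List.dropWhile_cons_of_pos h, List.length_cons,
        List.drop_succ_cons, ih]
    · rw [List.takeWhile_cons_of_neg h, List.dropWhile_cons_of_neg h, List.length_nil,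
        List.drop_zero]

-- invariant preservation: recording one position
theorem pvInv_step (data : List Int) (ws : Int) (occ : PySem.Dict Int (List Nat)) (d : Nat)
    (h : pvInv data ws occ d) :
    pvInv data ws (occ.modify (data.getD d 0) [] (fun lst => lst ++ [d])) (d + 1) := by
  intro b
  obtain ⟨m, hm1, hm2, hb⟩ := h b
  refine ⟨m, by omega, by omega, ?_⟩
  rw [PySem.Dict.getD_modify]
  by_cases hc : b = data.getD d 0
  · subst hc
    rw [if_pos rfl, hb, List.range_succ, List.filter_append]
    simp [hm2]
  · rw [if_neg hc, hb, List.range_succ, List.filter_append]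
    have hne : (data.getD d 0 == b) = false := by
      simp only [beq_eq_false_iff_ne, ne_eq]
      exact fun hh => hc hh.symm
    simp only [List.filter_cons, List.filter_nil, hne, Bool.false_and, List.append_nil,
      if_neg Bool.false_ne_true]

theorem pvInv_record (data : List Int) (ws : Int) :
    ∀ (k d : Nat) (occ : PySem.Dict Int (List Nat)), pvInv data ws occ d →
      pvInv data ws (pvRecord data occ (List.range' d k)) (d + k) := by
  intro k
  induction k with
  | zero => intro d occ h; simpa [pvRecord] using h
  | succ k ih =>
    intro d occ h
    rw [List.range'_succ]
    simp only [pvRecord, List.foldl_cons]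
    have := ih (d + 1) _ (pvInv_step data ws occ d h)
    simpa [pvRecord, Nat.add_comm, Nat.add_assoc, Nat.add_left_comm] using this

-- buckets are ascending (they are filters of range d)
theorem pvBucket_sorted (data : List Int) (b : Int) (m d : Nat) :
    ((List.range d).filter (fun p => data.getD p 0 == b && decide (m ≤ p))).Pairwise (· < ·) :=
  List.Pairwise.filter _ (List.pairwise_lt_range)

-- the pruned bucket is exactly A's candidate list restricted to the matching first byte
theorem pvBucket_prune (data : List Int) (b : Int) (m i lo : Nat) (hm : m ≤ lo) :
    (((List.range i).filter (fun p => data.getD p 0 == b && decide (m ≤ p))).dropWhile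
        (fun p => decide (p < lo)))
      = (List.range' lo (i - lo)).filter (fun j => data.getD j 0 == b) := by
  rw [pvDropWhile_sorted lo _ (pvBucket_sorted data b m i)]
  rw [List.filter_filter, ← pvRange_filter_ge lo i, List.filter_filter]
  apply List.filter_congr
  intro p hp
  by_cases hl : lo ≤ p
  · simp [hl, show m ≤ p from le_trans hm hl]
  · simp [hl]

-- invariant preservation: writing back the pruned bucket
theorem pvInv_insert (data : List Int) (ws : Int) (occ : PySem.Dict Int (List Nat)) (i : Nat)
    (b0 : Int) (lst2 : List Nat) (lo : Nat) (hlo : lo = ((i : Int) - ws).toNat)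
    (hl : lst2 = (List.range i).filter (fun p => data.getD p 0 == b0 && decide (min lo i ≤ p)))
    (h : pvInv data ws occ i) :
    pvInv data ws (occ.insert b0 lst2) i := by
  intro b
  by_cases hc : b = b0
  · refine ⟨min lo i, by omega, by omega, ?_⟩
    rw [hc, PySem.Dict.getD_insert, if_pos rfl, hl]
  · obtain ⟨m, hm1, hm2, hb⟩ := h b
    exact ⟨m, hm1, hm2, by rw [PySem.Dict.getD_insert, if_neg hc]; exact hb⟩

-- (range i).filter with the min-clamped cut-off is again the in-window candidate list
theorem pvFilter_min (data : List Int) (b0 : Int) (lo i : Nat) :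
    (List.range i).filter (fun p => data.getD p 0 == b0 && decide (min lo i ≤ p))
      = (List.range' lo (i - lo)).filter (fun j => data.getD j 0 == b0) := by
  rw [← pvRange_filter_ge lo i, List.filter_filter]
  apply List.filter_congr
  intro p hp
  rw [List.mem_range] at hp
  by_cases h1 : lo ≤ p
  · simp [h1, show min lo i ≤ p by omega]
  · simp [h1, show ¬ min lo i ≤ p by omega]

-- main loop equivalence, by fuel induction on data.length - i
theorem pvCand_pairwise (f : Nat → Bool) (lo n : Nat) :
    ((List.range' lo (n - lo)).filter f).Pairwise (· < ·) := by
  rw [← pvRange_filter_ge]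
  exact List.Pairwise.filter _ (List.Pairwise.filter _ List.pairwise_lt_range)

-- main loop equivalence, by fuel induction on data.length - i
theorem pvLoop_eq (data : List Int) (ws la : Int) :
    ∀ (k i done : Nat) (occ : PySem.Dict Int (List Nat)), data.length - i ≤ k → done ≤ i →
      pvInv data ws occ done →
      lzssALoop data ws la i = lzssBLoop data ws la occ done i := by
  intro k
  induction k with
  | zero =>
    intro i done occ hk hdone _
    rw [lzssALoop.eq_def, lzssBLoop.eq_def, dif_neg (by omega), dif_neg (by omega)]
  | succ k ih =>
    intro i done occ hk hdone hInv
    by_cases hin : i < data.length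
    case neg =>
      rw [lzssALoop.eq_def, lzssBLoop.eq_def, dif_neg hin, dif_neg hin]
    case pos =>
    have hInv1 : pvInv data ws (pvRecord data occ (List.range' done (i - done))) i := by
      have h2 := pvInv_record data ws (i - done) done occ hInv
      rwa [Nat.add_sub_cancel' hdone] at h2
    obtain ⟨m, hm1, hm2, hb⟩ := hInv1 (data.getD i 0)
    rw [lzssALoop.eq_def, lzssBLoop.eq_def, dif_pos hin, dif_pos hin]
    simp only [pvBScan]
    by_cases hguard : 1 < min la ((data.length : Int) - (i : Int))
    case neg =>
      rw [if_neg hguard]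
      simp only []
      have hA := pvFoldA_le_one data la (min la ((data.length : Int) - (i : Int))) i rfl
        (by omega) (List.range' (((i : Int) - ws).toNat) (i - ((i : Int) - ws).toNat))
        (0, 0) (by norm_num)
      rw [if_neg (by omega), if_neg (by norm_num)]
      exact congrArg _ (ih (i + 1) i _ (by omega) (by omega) hInv1)
    case pos =>
    rw [if_pos hguard]
    cases hget : (pvRecord data occ (List.range' done (i - done))).get? (data.getD i 0) with
    | none =>
      rw [PySem.Dict.getD_eq_get?_getD, hget] at hb
      simp only [Option.getD_none] at hb
      have hcand : (List.range' (((i : Int) - ws).toNat) (i - ((i : Int) - ws).toNat)).filter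
          (fun j => data.getD j 0 == data.getD i 0) = [] := by
        rw [← pvBucket_prune data (data.getD i 0) m i (((i : Int) - ws).toNat) hm1, ← hb]
        rfl
      simp only []
      rw [pvFoldA_filter data la i, hcand]
      simp only [List.foldl_nil]
      rw [if_neg (by norm_num), if_neg (by norm_num)]
      exact congrArg _ (ih (i + 1) i _ (by omega) (by omega) hInv1)
    | some lst =>
      have hlst : lst = (List.range i).filter
          (fun p => data.getD p 0 == data.getD i 0 && decide (m ≤ p)) := by
        rw [← hb, PySem.Dict.getD_eq_get?_getD, hget]
        rfl
      have hlst2 : lst.drop ((lst.takeWhile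
            (fun p => decide (p < ((i : Int) - ws).toNat))).length)
          = (List.range' (((i : Int) - ws).toNat) (i - ((i : Int) - ws).toNat)).filter
            (fun j => data.getD j 0 == data.getD i 0) := by
        rw [pvDrop_takeWhile, hlst,
          pvBucket_prune data (data.getD i 0) m i (((i : Int) - ws).toNat) hm1]
      simp only []
      rw [pvFoldA_filter data la i, hlst2]
      have hInv2 : pvInv data ws
          ((pvRecord data occ (List.range' done (i - done))).insert (data.getD i 0)
            ((List.range' (((i : Int) - ws).toNat) (i - ((i : Int) - ws).toNat)).filter
              (fun j => data.getD j 0 == data.getD i 0))) i :=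
        pvInv_insert data ws _ i (data.getD i 0) _ (((i : Int) - ws).toNat) rfl
          (pvFilter_min data (data.getD i 0) (((i : Int) - ws).toNat) i).symm hInv1
      have hcouple := pvCouple data la (min la ((data.length : Int) - (i : Int))) i rfl hin
        hguard
        ((List.range' (((i : Int) - ws).toNat) (i - ((i : Int) - ws).toNat)).filter
          (fun j => data.getD j 0 == data.getD i 0)) (0, 0) (0, 0)
        (pvCand_pairwise _ _ _) (Or.inr ⟨by norm_num, by norm_num⟩)
      set bestA := ((List.range' (((i : Int) - ws).toNat) (i - ((i : Int) - ws).toNat)).filter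
          (fun j => data.getD j 0 == data.getD i 0)).foldl (pvAStep data la i)
          ((0 : Int), (0 : Nat)) with hbA
      set bestB := (((List.range' (((i : Int) - ws).toNat) (i - ((i : Int) - ws).toNat)).filter
          (fun j => data.getD j 0 == data.getD i 0)).map
            (fun j => (pvPrefixLen data j i (min la ((data.length : Int) - (i : Int))),
              (i : Int) - (j : Int)))).foldl pvLexMax ((0 : Int), (0 : Int)) with hbB
      rcases hcouple with ⟨h2, heqB⟩ | ⟨hA1, hB1⟩
      · rw [heqB]
        have hc1 : ((1 : Int) < ((bestA.2 : Nat) : Int)) = (1 < bestA.2) := by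
          simp only [eq_iff_iff]; omega
        have hc2 : ((i : Int) + ((bestA.2 : Nat) : Int) < ((data.length : Nat) : Int))
            = (i + bestA.2 < data.length) := by
          simp only [eq_iff_iff]; omega
        simp only [Int.toNat_natCast, hc1, hc2]
        rw [if_pos (show 1 < bestA.2 by omega), if_pos (show 1 < bestA.2 by omega)]
        exact congrArg _ (ih (i + bestA.2 + 1) i _ (by omega) (by omega) hInv2)
      · rw [if_neg (by omega), if_neg (by omega)]
        exact congrArg _ (ih (i + 1) i _ (by omega) (by omega) hInv2)

-- ===== VERDICT (by name: the statement is the Claim_ definition above) =====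
theorem lzss_compress_spec : Claim_equal_lzss_compress := by
  intro data ws la _
  unfold Spec_lzss_compress lzss_compress lzss_compress_alt
  exact pvLoop_eq data ws la data.length 0 0 PySem.Dict.empty (by omega) (by omega)
    (pvInv_empty data ws)
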